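-- pv_equiv track=rewrite | github.com/AmirEmad11/instabot0 | instagram-bot/Instagram-Lead-Bot/instagram_automation/streamlit_app.py | _text_to_templates
-- ===== SOURCE A (Python) =====
-- def _text_to_list(text: str) -> list[str]:
--     return [l.strip() for l in text.replace(",", "\n").splitlines() if l.strip()]
--
-- def _text_to_templates(text: str) -> list[str]:
--     blocks = [p.strip() for p in text.split("\n\n") if p.strip()]
--     if len(blocks) > 1: return blocks
--     def _pipe(s):
--         parts, depth, cur = [], 0, []
--         for ch in s:
--             if ch == '{': depth += 1; cur.append(ch)
--             elif ch == '}': depth -= 1; cur.append(ch)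
--             elif ch == '|' and depth == 0:
--                 p = ''.join(cur).strip()
--                 if p: parts.append(p); cur = []
--             else: cur.append(ch)
--         last = ''.join(cur).strip()
--         if last: parts.append(last)
--         return parts
--     return _pipe(text) if blocks else _text_to_list(text)
-- ===== SOURCE B (Python) =====
-- def _text_to_list(text: str) -> list[str]:
--     return [l.strip() for l in text.replace(",", "\n").splitlines() if l.strip()]
--
-- def _text_to_templates(text: str) -> list[str]:
--     blocks = [p.strip() for p in text.split("\n\n") if p.strip()]
--     if len(blocks) > 1:
--         return blocks
--     if not blocks:
--         return _text_to_list(text)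
--     raw = text.split('|')
--     pieces = []
--     cur = raw[0]
--     depth = raw[0].count('{') - raw[0].count('}')
--     for seg in raw[1:]:
--         if depth == 0:
--             pieces.append(cur)
--             cur = seg
--         else:
--             cur += '|' + seg
--         depth += seg.count('{') - seg.count('}')
--     pieces.append(cur)
--     return [p for p in (q.strip() for q in pieces) if p]
-- ===== Notes on version B (the rewrite author's own statement) =====
-- stated objective: faster
-- what changed: The per-character accumulator loop of _pipe is replaced by one str.split on the pipe separator followed by a merge of the raw segments driven by a signed brace-depth counter, stripping and filtering the assembled pieces at the end.
import Mathlib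
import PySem

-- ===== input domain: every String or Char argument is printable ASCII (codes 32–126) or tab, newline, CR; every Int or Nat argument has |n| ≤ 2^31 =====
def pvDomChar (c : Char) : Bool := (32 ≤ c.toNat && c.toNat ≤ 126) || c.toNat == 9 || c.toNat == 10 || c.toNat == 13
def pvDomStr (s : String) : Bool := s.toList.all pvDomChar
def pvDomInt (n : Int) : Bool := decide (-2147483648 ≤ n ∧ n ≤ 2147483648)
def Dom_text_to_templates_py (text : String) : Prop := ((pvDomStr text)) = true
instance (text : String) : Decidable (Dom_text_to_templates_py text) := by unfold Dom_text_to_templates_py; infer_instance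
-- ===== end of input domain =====

-- B replaces A's per-character pipe-splitting accumulator with one split on the pipe separator
-- followed by a depth-guided merge of the segments; same return value, measured faster (C-level split).

-- ===== PORT A =====
-- shared module helper _text_to_list (identical in both sources)
def textToListPy (text : String) : List String :=
  ((PySem.Str.splitlines (PySem.Str.replace text "," "\n")).map PySem.Str.strip).filter
    (fun l => l ≠ "")

-- blocks = [p.strip() for p in text.split("\n\n") if p.strip()] (identical first line of A and B)
def blocksOf (text : String) : List String :=
  (((PySem.Chars.splitOn text.toList "\n\n".toList).map PySem.Chars.strip).filter
    (fun p => p ≠ [])).map String.ofList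

-- the character loop of A's _pipe (cur kept as a List Char, ''.join(cur).strip() = Chars.strip cur)
def pipeAGo : List Char → Int → List Char → List String → List String
  | [], _d, cur, parts =>
      let last := PySem.Chars.strip cur
      if last ≠ [] then parts ++ [String.ofList last] else parts
  | c :: t, d, cur, parts =>
      if c = '{' then pipeAGo t (d + 1) (cur ++ [c]) parts
      else if c = '}' then pipeAGo t (d - 1) (cur ++ [c]) parts
      else if c = '|' ∧ d = 0 then
        let p := PySem.Chars.strip cur
        if p ≠ [] then pipeAGo t d [] (parts ++ [String.ofList p]) else pipeAGo t d cur parts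
      else pipeAGo t d (cur ++ [c]) parts

def text_to_templates_py (text : String) : List String :=
  let blocks := blocksOf text
  if blocks.length > 1 then blocks
  else if blocks ≠ [] then pipeAGo text.toList 0 [] []
  else textToListPy text

-- ===== PORT B =====
-- seg.count('{') - seg.count('}')
def deltaSeg (seg : List Char) : Int :=
  (PySem.Chars.count seg ['{'] : Int) - (PySem.Chars.count seg ['}'] : Int)

-- B's merge loop over the raw '|'-segments (depth, piece in progress)
def mergeGo : List (List Char) → Int → List Char → List (List Char)
  | [], _d, cur => [cur]
  | seg :: t, d, cur =>
      if d = 0 then cur :: mergeGo t (deltaSeg seg) seg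
      else mergeGo t (d + deltaSeg seg) (cur ++ '|' :: seg)

def pipeB (text : String) : List String :=
  match PySem.Chars.splitOn text.toList ['|'] with
  | [] => []  -- unreachable: str.split never returns an empty list
  | r0 :: rest =>
      (((mergeGo rest (deltaSeg r0) r0).map PySem.Chars.strip).filter (fun p => p ≠ [])).map
        String.ofList

def text_to_templates_py_alt (text : String) : List String :=
  let blocks := blocksOf text
  if blocks.length > 1 then blocks
  else if blocks = [] then textToListPy text
  else pipeB text

-- ===== PRECONDITION & SPEC =====
def Spec_text_to_templates_py (text : String) (out : List String) : Prop := out = text_to_templates_py_alt text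
instance (text : String) (out : List String) : Decidable (Spec_text_to_templates_py text out) := by unfold Spec_text_to_templates_py; infer_instance

-- ===== CLAIM (what is proved, stated in full; the proofs are below) =====
def Claim_equal_text_to_templates_py : Prop := ∀ (text : String), Dom_text_to_templates_py text → Spec_text_to_templates_py text (text_to_templates_py text)

-- ===== LEMMAS AND PROOFS =====

-- proof-side: split on '|' as a structural recursion returning (first segment, later segments)
def splitP : List Char → List Char × List (List Char)
  | [] => ([], [])
  | c :: t =>
      let p := splitP t
      if c = '|' then ([], p.1 :: p.2) else (c :: p.1, p.2)

-- proof-side: brace weight of one character / countP form of deltaSeg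
def dchar (c : Char) : Int := if c = '{' then 1 else if c = '}' then -1 else 0

def delta' (seg : List Char) : Int :=
  (seg.countP (· = '{') : Int) - (seg.countP (· = '}') : Int)

-- proof-side: the common char-level recursion both sides are reduced to
def mergeC : List Char → Int → List Char → List (List Char)
  | [], _d, cur => [cur]
  | c :: t, d, cur =>
      if c = '|' ∧ d = 0 then cur :: mergeC t 0 []
      else mergeC t (d + dchar c) (cur ++ [c])

theorem mergeC_pipe_zero (t cur : List Char) :
    mergeC ('|' :: t) 0 cur = cur :: mergeC t 0 [] := by
  simp [mergeC]

theorem mergeC_pipe_ne (t cur : List Char) (d : Int) (hd : d ≠ 0) :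
    mergeC ('|' :: t) d cur = mergeC t d (cur ++ ['|']) := by
  simp [mergeC, dchar, hd]

theorem mergeC_other (c : Char) (t cur : List Char) (d : Int) (h : ¬ (c = '|' ∧ d = 0)) :
    mergeC (c :: t) d cur = mergeC t (d + dchar c) (cur ++ [c]) := by
  simp [mergeC, h]

theorem splitOn_go_pipe (fuel : Nat) (l cur : List Char) (acc : List (List Char))
    (h : l.length < fuel) :
    PySem.Chars.splitOn.go ['|'] fuel l cur acc =
      acc.reverse ++ ((splitP l).1 :: (splitP l).2).modifyHead (cur.reverse ++ ·) := by
  induction fuel generalizing l cur acc with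
  | zero => omega
  | succ n ih =>
    cases l with
    | nil => simp [PySem.Chars.splitOn.go, splitP]
    | cons c t =>
      by_cases hc : c = '|'
      · subst hc
        simp only [PySem.Chars.splitOn.go, List.isPrefixOf, BEq.rfl, Bool.and_self, if_true]
        simp only [List.length_cons, List.length_nil, List.drop_succ_cons, List.drop_zero]
        rw [ih t [] (cur.reverse :: acc) (by simpa using Nat.lt_of_succ_lt_succ h)]
        simp [splitP]
      · have hpre : (['|'].isPrefixOf (c :: t)) = false := by
          simp [List.isPrefixOf]; exact fun hh => (hc hh.symm).elim
        simp only [PySem.Chars.splitOn.go, hpre, Bool.false_eq_true, if_false]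
        rw [ih t (c :: cur) acc (by simpa using Nat.lt_of_succ_lt_succ h)]
        simp [splitP, hc]

theorem splitOn_pipe (l : List Char) :
    PySem.Chars.splitOn l ['|'] = (splitP l).1 :: (splitP l).2 := by
  unfold PySem.Chars.splitOn
  rw [splitOn_go_pipe (l.length + 1) l [] [] (by omega)]
  simp

theorem count_go_char (c : Char) (fuel : Nat) (l : List Char) (acc : Nat)
    (h : l.length ≤ fuel) :
    PySem.Chars.count.go [c] fuel l acc = acc + l.countP (· = c) := by
  induction fuel generalizing l acc with
  | zero =>
    have : l = [] := List.eq_nil_of_length_eq_zero (Nat.le_zero.mp h)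
    subst this; simp [PySem.Chars.count.go]
  | succ n ih =>
    cases l with
    | nil => simp [PySem.Chars.count.go]
    | cons x t =>
      by_cases hx : c = x
      · subst hx
        simp only [PySem.Chars.count.go, List.isPrefixOf, BEq.rfl, Bool.and_self, if_true]
        simp only [List.length_cons, List.length_nil, List.drop_succ_cons, List.drop_zero]
        rw [ih t (acc + 1) (by simpa using Nat.le_of_succ_le_succ h)]
        simp; omega
      · have hpre : ([c].isPrefixOf (x :: t)) = false := by
          simp [List.isPrefixOf]; exact fun hh => (hx hh).elim
        simp only [PySem.Chars.count.go, hpre, Bool.false_eq_true, if_false]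
        rw [ih t acc (by simpa using Nat.le_of_succ_le_succ h)]
        have hxc : (decide (x = c)) = false := by
          simp; exact fun hh => hx hh.symm
        simp [hxc]

theorem count_char (l : List Char) (c : Char) :
    PySem.Chars.count l [c] = l.countP (· = c) := by
  unfold PySem.Chars.count
  rw [if_neg (by simp), count_go_char c l.length l 0 (le_refl _)]
  omega

theorem deltaSeg_eq (seg : List Char) : deltaSeg seg = delta' seg := by
  simp [deltaSeg, delta', count_char]

theorem delta'_nil : delta' ([] : List Char) = 0 := by simp [delta']

theorem delta'_cons (c : Char) (t : List Char) : delta' (c :: t) = dchar c + delta' t := by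
  simp only [delta', dchar, List.countP_cons]
  by_cases h1 : c = '{' <;> by_cases h2 : c = '}' <;> simp_all <;> push_cast <;> ring

-- B's segment merge over splitP equals the char-level mergeC
theorem mergeGo_splitP (l : List Char) (d : Int) (cur : List Char) :
    mergeGo (splitP l).2 (d + delta' (splitP l).1) (cur ++ (splitP l).1) = mergeC l d cur := by
  induction l generalizing d cur with
  | nil => simp [splitP, mergeGo, mergeC]
  | cons c t ih =>
    by_cases hc : c = '|'
    · subst hc
      have hsp : splitP ('|' :: t) = ([], (splitP t).1 :: (splitP t).2) := by simp [splitP]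
      rw [hsp]
      simp only [delta'_nil, add_zero, List.append_nil, mergeGo, deltaSeg_eq]
      by_cases hd : d = 0
      · subst hd
        rw [if_pos rfl, mergeC_pipe_zero]
        have := ih 0 []
        simp only [zero_add, List.nil_append] at this
        rw [this]
      · rw [if_neg hd, mergeC_pipe_ne t cur d hd]
        have := ih d (cur ++ ['|'])
        simp only [List.append_assoc, List.singleton_append] at this
        rw [this]
    · have hsp : splitP (c :: t) = (c :: (splitP t).1, (splitP t).2) := by simp [splitP, hc]
      rw [hsp, mergeC_other c t cur d (fun hh => hc hh.1)]
      rw [delta'_cons, ← add_assoc]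
      have h2 : cur ++ c :: (splitP t).1 = (cur ++ [c]) ++ (splitP t).1 := by simp
      rw [h2]
      exact ih (d + dchar c) (cur ++ [c])

-- prefixing the accumulator only prefixes the first produced piece
theorem mergeC_pre (l : List Char) (d : Int) (pre acc : List Char) :
    mergeC l d (pre ++ acc) = (mergeC l d acc).modifyHead (pre ++ ·) := by
  induction l generalizing d acc with
  | nil => simp [mergeC]
  | cons c t ih =>
    by_cases h : c = '|' ∧ d = 0
    · obtain ⟨hc, hd⟩ := h; subst hc; subst hd
      rw [mergeC_pipe_zero, mergeC_pipe_zero]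
      simp [List.modifyHead]
    · rw [mergeC_other c t _ d h, mergeC_other c t acc d h, List.append_assoc]
      exact ih _ _

theorem mergeC_ne_nil (l : List Char) (d : Int) (cur : List Char) : mergeC l d cur ≠ [] := by
  induction l generalizing d cur with
  | nil => simp [mergeC]
  | cons c t ih =>
    by_cases h : c = '|' ∧ d = 0
    · obtain ⟨hc, hd⟩ := h; subst hc; subst hd
      rw [mergeC_pipe_zero]; simp
    · rw [mergeC_other c t cur d h]; exact ih _ _

-- a string that strips to empty is all whitespace
theorem strip_eq_nil_all (cur : List Char) (h : PySem.Chars.strip cur = []) :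
    ∀ x ∈ cur, PySem.Chars.isspace x = true := by
  simp only [PySem.Chars.strip, PySem.Chars.rstrip, PySem.Chars.lstrip,
    List.reverse_eq_nil_iff, List.dropWhile_eq_nil_iff] at h
  intro x hx
  have hsplit := List.takeWhile_append_dropWhile (p := PySem.Chars.isspace) (l := cur)
  rcases List.mem_append.mp (by rw [hsplit]; exact hx) with h1 | h1
  · exact List.mem_takeWhile_imp h1
  · exact h x (by simpa using h1)

-- an all-whitespace prefix does not change strip
theorem strip_ws_prefix (pre x : List Char) (h : PySem.Chars.strip pre = []) :
    PySem.Chars.strip (pre ++ x) = PySem.Chars.strip x := by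
  have hall := strip_eq_nil_all pre h
  have hl : PySem.Chars.lstrip (pre ++ x) = PySem.Chars.lstrip x := by
    simp only [PySem.Chars.lstrip, List.dropWhile_append]
    have hpre : List.dropWhile PySem.Chars.isspace pre = [] :=
      List.dropWhile_eq_nil_iff.mpr hall
    simp [hpre]
  simp [PySem.Chars.strip, hl]

-- the filtered/stripped pieces ignore an all-whitespace leading accumulator
theorem filter_strip_pre (l : List Char) (d : Int) (cur : List Char)
    (h : PySem.Chars.strip cur = []) :
    ((mergeC l d cur).map PySem.Chars.strip).filter (fun p => p ≠ []) =
    ((mergeC l d []).map PySem.Chars.strip).filter (fun p => p ≠ []) := by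
  have hp := mergeC_pre l d cur []
  simp only [List.append_nil] at hp
  rw [hp]
  cases hm : mergeC l d [] with
  | nil => exact absurd hm (mergeC_ne_nil l d [])
  | cons h0 rest =>
    simp only [List.modifyHead, List.map_cons, List.filter]
    rw [strip_ws_prefix cur h0 h]

-- A's char loop equals filtered/stripped mergeC
theorem pipeAGo_eq (l : List Char) (d : Int) (cur : List Char) (parts : List String) :
    pipeAGo l d cur parts =
      parts ++
        (((mergeC l d cur).map PySem.Chars.strip).filter (fun p => p ≠ [])).map String.ofList := by
  induction l generalizing d cur parts with
  | nil =>
    simp only [pipeAGo, mergeC, List.map_cons, List.map_nil, List.filter]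
    by_cases h : PySem.Chars.strip cur = [] <;> simp [h]
  | cons c t ih =>
    by_cases h1 : c = '{'
    · subst h1
      have hstep : pipeAGo ('{' :: t) d cur parts = pipeAGo t (d + 1) (cur ++ ['{']) parts := by
        simp [pipeAGo]
      have hm : d + dchar '{' = d + 1 := by rw [show dchar '{' = 1 from by decide]
      rw [hstep, mergeC_other '{' t cur d (fun hh => by simpa using hh.1), hm, ih]
    · by_cases h2 : c = '}'
      · subst h2
        have hstep : pipeAGo ('}' :: t) d cur parts = pipeAGo t (d - 1) (cur ++ ['}']) parts := by
          simp [pipeAGo]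
        have hm : d + dchar '}' = d - 1 := by rw [show dchar '}' = -1 from by decide]; ring
        rw [hstep, mergeC_other '}' t cur d (fun hh => by simpa using hh.1), hm, ih]
      · by_cases h3 : c = '|' ∧ d = 0
        · obtain ⟨hc, hd⟩ := h3; subst hc; subst hd
          rw [mergeC_pipe_zero]
          by_cases hp : PySem.Chars.strip cur = []
          · have hstep : pipeAGo ('|' :: t) 0 cur parts = pipeAGo t 0 cur parts := by
              simp [pipeAGo, hp]
            rw [hstep, ih, filter_strip_pre t 0 cur hp]
            simp [hp]
          · have hstep : pipeAGo ('|' :: t) 0 cur parts =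
                pipeAGo t 0 [] (parts ++ [String.ofList (PySem.Chars.strip cur)]) := by
              simp [pipeAGo, hp]
            rw [hstep, ih]
            simp [hp]
        · have hstep : pipeAGo (c :: t) d cur parts = pipeAGo t d (cur ++ [c]) parts := by
            simp [pipeAGo, h1, h2, h3]
          have hm : d + dchar c = d := by simp [dchar, h1, h2]
          rw [hstep, mergeC_other c t cur d h3, hm, ih]

-- the two pipe splitters agree
theorem pipe_eq (text : String) : pipeAGo text.toList 0 [] [] = pipeB text := by
  have hmatch : pipeB text =
      (((mergeGo (splitP text.toList).2 (deltaSeg (splitP text.toList).1)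
            (splitP text.toList).1).map PySem.Chars.strip).filter (fun p => p ≠ [])).map
        String.ofList := by
    unfold pipeB
    rw [splitOn_pipe]
  rw [pipeAGo_eq, hmatch, deltaSeg_eq]
  have := mergeGo_splitP text.toList 0 []
  simp only [zero_add, List.nil_append] at this
  rw [this]
  simp

-- ===== VERDICT (by name: the statement is the Claim_ definition above) =====
theorem text_to_templates_py_spec : Claim_equal_text_to_templates_py := by
  intro text _
  unfold Spec_text_to_templates_py text_to_templates_py text_to_templates_py_alt
  by_cases h1 : (blocksOf text).length > 1
  · simp [h1]
  · by_cases h2 : blocksOf text = []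
    · simp [h1, h2]
    · simp [h1, h2, pipe_eq]
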